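-- pv_equiv track=rewrite | github.com/kelvinhuang0327/number-pattern-research | tools/predict_biglotto_regime.py | enforce_parity
-- ===== SOURCE A (Python) =====
-- def enforce_parity(bet, max_same=5, max_num=49):
--     """
--     Parity soft constraint: 若6個號碼全奇或全偶, 替換最弱號碼.
--     034期教訓: 6:0全奇=1.37%極端事件, 加此約束+2hits (107 vs 105).
--     """
--     bet = list(bet)
--     odd_count = sum(1 for n in bet if n % 2 == 1)
--     even_count = 6 - odd_count
--
--     if odd_count <= max_same and even_count <= max_same:
--         return sorted(bet)
--
--     if odd_count > max_same:
--         target = [n for n in bet if n % 2 == 1][-1]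
--         candidates = [n for n in range(1, max_num + 1) if n % 2 == 0 and n not in bet]
--     else:
--         target = [n for n in bet if n % 2 == 0][-1]
--         candidates = [n for n in range(1, max_num + 1) if n % 2 == 1 and n not in bet]
--
--     if candidates:
--         replacement = min(candidates, key=lambda x: abs(x - target))
--         bet[bet.index(target)] = replacement
--
--     return sorted(bet)
-- ===== SOURCE B (Python) =====
-- def enforce_parity(bet, max_same=5, max_num=49):
--     """
--     Parity soft constraint: if the 6 numbers are all odd / all even, replace
--     the weakest number by the nearest available number of the other parity.
--     """
--     bet = list(bet)
--     odds = [n for n in bet if n % 2 == 1]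
--     evens = [n for n in bet if n % 2 == 0]
--     if len(odds) <= max_same and 6 - len(odds) <= max_same:
--         return sorted(bet)
--
--     if len(odds) > max_same:
--         target, want = odds[-1], 0
--     else:
--         target, want = evens[-1], 1
--
--     # Nearest available number of parity `want` below the target and above it:
--     # step by 2 through the numbers of that parity inside [1, max_num].
--     s = min(target, max_num)
--     if s % 2 != want:
--         s -= 1
--     below = next((x for x in range(s, 0, -2) if x not in bet), None)
--     s = max(target, 1)
--     if s % 2 != want:
--         s += 1
--     above = next((x for x in range(s, max_num + 1, 2) if x not in bet), None)
--
--     if below is not None and (above is None or target - below <= above - target):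
--         bet[bet.index(target)] = below
--     elif above is not None:
--         bet[bet.index(target)] = above
--     return sorted(bet)
-- ===== Notes on version B (the rewrite author's own statement) =====
-- stated objective: alternative
-- what changed: Instead of materialising the full candidate list over range(1, max_num+1) and taking min(..., key=abs(x-target)), B runs two parity-stepped directional scans (nearest available number below the target and nearest above it) and picks the closer of the two, tying to the smaller; Pre_ excludes only the inputs where A raises IndexError (an unbalanced bet with no number of the needed parity).
import Mathlib
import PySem

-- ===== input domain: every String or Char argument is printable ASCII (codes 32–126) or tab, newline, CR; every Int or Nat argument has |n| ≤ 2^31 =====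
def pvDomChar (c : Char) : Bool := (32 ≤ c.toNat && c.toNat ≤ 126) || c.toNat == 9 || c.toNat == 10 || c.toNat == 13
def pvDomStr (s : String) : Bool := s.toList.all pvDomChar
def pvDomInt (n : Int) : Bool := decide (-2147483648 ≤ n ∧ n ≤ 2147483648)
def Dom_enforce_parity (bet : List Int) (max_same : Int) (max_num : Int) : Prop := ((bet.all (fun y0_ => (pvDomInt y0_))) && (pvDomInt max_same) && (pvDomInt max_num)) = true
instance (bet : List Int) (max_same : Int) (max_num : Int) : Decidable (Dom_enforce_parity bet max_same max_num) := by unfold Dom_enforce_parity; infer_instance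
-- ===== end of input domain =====

-- B replaces A's build-all-candidates-then-min step by two directional parity-stepped
-- scans (nearest available number below the target and above it, then pick the closer,
-- tie to the smaller); an alternative decomposition, return values agree wherever A
-- does not raise.

-- ===== PORT A =====
def enforce_parity (bet : List Int) (max_same : Int) (max_num : Int) : List Int :=
  let odd_count : Int := bet.foldl (fun acc n => if PySem.Int.mod n 2 == 1 then acc + 1 else acc) 0
  let even_count : Int := 6 - odd_count
  if odd_count ≤ max_same ∧ even_count ≤ max_same then
    PySem.List.sorted bet (fun x => x) false
  else
    let tc : Int × List Int :=
      if max_same < odd_count then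
        (PySem.List.pyGetD (bet.filter (fun n => PySem.Int.mod n 2 == 1)) (-1) 0,
         (PySem.List.pyRange 1 (max_num + 1) 1).filter
           (fun n => PySem.Int.mod n 2 == 0 && !bet.contains n))
      else
        (PySem.List.pyGetD (bet.filter (fun n => PySem.Int.mod n 2 == 0)) (-1) 0,
         (PySem.List.pyRange 1 (max_num + 1) 1).filter
           (fun n => PySem.Int.mod n 2 == 1 && !bet.contains n))
    match PySem.List.min? tc.2 (fun x => |x - tc.1|) with
    | none => PySem.List.sorted bet (fun x => x) false
    | some replacement =>
      match PySem.List.index? bet tc.1 with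
      | none => PySem.List.sorted bet (fun x => x) false  -- unreachable: .index raises only if target ∉ bet
      | some i => PySem.List.sorted (PySem.List.pySetD bet (i : Int) replacement) (fun x => x) false

-- ===== PORT B =====
def enforce_parity_alt (bet : List Int) (max_same : Int) (max_num : Int) : List Int :=
  let odds := bet.filter (fun n => PySem.Int.mod n 2 == 1)
  let evens := bet.filter (fun n => PySem.Int.mod n 2 == 0)
  if (odds.length : Int) ≤ max_same ∧ 6 - (odds.length : Int) ≤ max_same then
    PySem.List.sorted bet (fun x => x) false
  else
    let tw : Int × Int :=
      if max_same < (odds.length : Int) then (PySem.List.pyGetD odds (-1) 0, 0)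
      else (PySem.List.pyGetD evens (-1) 0, 1)
    let s1 : Int := min tw.1 max_num
    let s1' : Int := if PySem.Int.mod s1 2 == tw.2 then s1 else s1 - 1
    let below := (PySem.List.pyRange s1' 0 (-2)).find? (fun x => !bet.contains x)
    let s2 : Int := max tw.1 1
    let s2' : Int := if PySem.Int.mod s2 2 == tw.2 then s2 else s2 + 1
    let above := (PySem.List.pyRange s2' (max_num + 1) 2).find? (fun x => !bet.contains x)
    let repl : Option Int :=
      match below, above with
      | some lo, none => some lo
      | some lo, some hi => if tw.1 - lo ≤ hi - tw.1 then some lo else some hi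
      | none, some hi => some hi
      | none, none => none
    match repl with
    | none => PySem.List.sorted bet (fun x => x) false
    | some r =>
      match PySem.List.index? bet tw.1 with
      | none => PySem.List.sorted bet (fun x => x) false  -- unreachable: target ∈ bet here
      | some i => PySem.List.sorted (PySem.List.pySetD bet (i : Int) r) (fun x => x) false

-- ===== PRECONDITION & SPEC =====
-- Pre_ excludes exactly the inputs on which A raises IndexError: an unbalanced bet whose
-- needed-parity sublist is empty (e.g. bet = [] with default max_same).
def Pre_enforce_parity (bet : List Int) (max_same : Int) (max_num : Int) : Prop :=
  ((bet.countP (fun n => PySem.Int.mod n 2 == 1) : Int) ≤ max_same ∧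
     6 - (bet.countP (fun n => PySem.Int.mod n 2 == 1) : Int) ≤ max_same) ∨
  (max_same < (bet.countP (fun n => PySem.Int.mod n 2 == 1) : Int) ∧
     ∃ n ∈ bet, PySem.Int.mod n 2 = 1) ∨
  ((bet.countP (fun n => PySem.Int.mod n 2 == 1) : Int) ≤ max_same ∧
     ∃ n ∈ bet, PySem.Int.mod n 2 = 0)
instance (bet : List Int) (max_same : Int) (max_num : Int) : Decidable (Pre_enforce_parity bet max_same max_num) := by unfold Pre_enforce_parity; infer_instance

def pvWitness_enforce_parity : List Int × Int × Int := ([1, 3, 5, 7, 9, 11], 5, 49)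

def Spec_enforce_parity (bet : List Int) (max_same : Int) (max_num : Int) (out : List Int) : Prop := out = enforce_parity_alt bet max_same max_num
instance (bet : List Int) (max_same : Int) (max_num : Int) (out : List Int) : Decidable (Spec_enforce_parity bet max_same max_num out) := by unfold Spec_enforce_parity; infer_instance

-- ===== CLAIM (what is proved, stated in full; the proofs are below) =====
def Claim_equal_enforce_parity : Prop := ∀ (bet : List Int) (max_same : Int) (max_num : Int), Dom_enforce_parity bet max_same max_num → Pre_enforce_parity bet max_same max_num → Spec_enforce_parity bet max_same max_num (enforce_parity bet max_same max_num)

-- ===== LEMMAS AND PROOFS =====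

-- the generator-sum in A counts like countP
theorem pv_count_foldl_aux (bet : List Int) (a : Int) :
    bet.foldl (fun acc n => if PySem.Int.mod n 2 == 1 then acc + 1 else acc) a
      = a + (bet.countP (fun n => PySem.Int.mod n 2 == 1) : Int) := by
  induction bet generalizing a with
  | nil => simp
  | cons h t ih =>
    simp only [List.foldl_cons, List.countP_cons, ih]
    by_cases hp : PySem.Int.mod h 2 == 1 <;> simp only [hp, if_true, if_false, Bool.false_eq_true] <;> omega

-- xs[-1] is a member when xs ≠ []
theorem pv_pyGetD_neg_one_mem {xs : List Int} (h : xs ≠ []) (d : Int) :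
    PySem.List.pyGetD xs (-1) d ∈ xs := by
  have hl : 0 < xs.length := List.length_pos_iff.mpr h
  unfold PySem.List.pyGetD PySem.List.pyGet? PySem.List.pyIdx?
  rw [if_neg (by omega : ¬ (0:Int) ≤ -1), if_pos (by omega : -(xs.length:Int) ≤ -1)]
  have he : (-(-1:Int)).toNat = 1 := by decide
  rw [he]
  have hlt : xs.length - 1 < xs.length := by omega
  simp only [Option.bind, List.getElem?_eq_getElem hlt, Option.getD_some]
  exact List.getElem_mem _

theorem pv_foldl_keep (key : Int → Int) (step : Option Int → Int → Option Int)
    (hs : ∀ c x, step (some c) x = if key x < key c then some x else some c)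
    (l : List Int) (m : Int) (h : ∀ y ∈ l, key m ≤ key y) :
    l.foldl step (some m) = some m := by
  induction l with
  | nil => rfl
  | cons a l ih =>
    have ha := h a (by simp)
    simp only [List.foldl_cons, hs]
    rw [if_neg (by omega)]
    exact ih (fun y hy => h y (by simp [hy]))

theorem pv_foldl_pass (key : Int → Int) (step : Option Int → Int → Option Int)
    (hs : ∀ c x, step (some c) x = if key x < key c then some x else some c)
    (l1 l2 : List Int) (m a : Int)
    (ha : key m < key a)
    (h1 : ∀ y ∈ l1, key m < key y) (h2 : ∀ y ∈ l2, key m ≤ key y) :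
    (l1 ++ m :: l2).foldl step (some a) = some m := by
  induction l1 generalizing a with
  | nil =>
    simp only [List.nil_append, List.foldl_cons, hs]
    rw [if_pos ha]
    exact pv_foldl_keep key step hs l2 m h2
  | cons b l1 ih =>
    simp only [List.cons_append, List.foldl_cons, hs]
    have hb := h1 b (by simp)
    by_cases hba : key b < key a
    · rw [if_pos hba]; exact ih b hb (fun y hy => h1 y (by simp [hy]))
    · rw [if_neg hba]; exact ih a ha (fun y hy => h1 y (by simp [hy]))

-- min? returns the first element realising the minimal key
theorem pv_min?_eq_first {l1 l2 : List Int} {m : Int} (key : Int → Int)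
    (h1 : ∀ y ∈ l1, key m < key y) (h2 : ∀ y ∈ l2, key m ≤ key y) :
    PySem.List.min? (l1 ++ m :: l2) key = some m := by
  unfold PySem.List.min?
  cases l1 with
  | nil =>
    simp only [List.nil_append, List.foldl_cons]
    exact pv_foldl_keep key _ (fun c x => rfl) l2 m h2
  | cons a l1 =>
    simp only [List.cons_append, List.foldl_cons]
    exact pv_foldl_pass key _ (fun c x => rfl) l1 l2 m a (h1 a (by simp))
      (fun y hy => h1 y (by simp [hy])) h2

-- find? on a strictly decreasing list returns the largest satisfying element
theorem pv_find?_desc {p : Int → Bool} {l : List Int} {a : Int}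
    (hpw : l.Pairwise (fun x y => y < x)) (h : l.find? p = some a) :
    p a = true ∧ a ∈ l ∧ ∀ y ∈ l, p y = true → y ≤ a := by
  obtain ⟨hpa, as, bs, rfl, hfail⟩ := List.find?_eq_some_iff_append.mp h
  refine ⟨hpa, by simp, ?_⟩
  intro y hy hpy
  rcases List.mem_append.mp hy with hy | hy
  · exact absurd hpy (by simpa using hfail y hy)
  · rcases List.mem_cons.mp hy with rfl | hy
    · exact le_refl _
    · have := (List.pairwise_cons.mp (List.pairwise_append.mp hpw).2.1).1 y hy
      omega

-- find? on a strictly increasing list returns the smallest satisfying element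
theorem pv_find?_asc {p : Int → Bool} {l : List Int} {a : Int}
    (hpw : l.Pairwise (fun x y => x < y)) (h : l.find? p = some a) :
    p a = true ∧ a ∈ l ∧ ∀ y ∈ l, p y = true → a ≤ y := by
  obtain ⟨hpa, as, bs, rfl, hfail⟩ := List.find?_eq_some_iff_append.mp h
  refine ⟨hpa, by simp, ?_⟩
  intro y hy hpy
  rcases List.mem_append.mp hy with hy | hy
  · exact absurd hpy (by simpa using hfail y hy)
  · rcases List.mem_cons.mp hy with rfl | hy
    · exact le_refl _
    · have := (List.pairwise_cons.mp (List.pairwise_append.mp hpw).2.1).1 y hy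
      omega

theorem pv_pairwise_pyRange_neg_two (a b : Int) :
    (PySem.List.pyRange a b (-2)).Pairwise (fun x y => y < x) := by
  rw [PySem.List.pyRange_of_neg a b (by norm_num : (-2:Int) < 0)]
  exact (List.pairwise_map).mpr (List.pairwise_lt_range.imp (by intro i j h; omega))

theorem pv_pairwise_pyRange_pos_two (a b : Int) :
    (PySem.List.pyRange a b 2).Pairwise (fun x y => x < y) := by
  rw [PySem.List.pyRange_of_pos a b (by norm_num : (0:Int) < 2)]
  exact (List.pairwise_map).mpr (List.pairwise_lt_range.imp (by intro i j h; omega))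

-- membership in A's candidate list, in arithmetic form
theorem pv_mem_cands (bet : List Int) (mn w x : Int) :
    x ∈ (PySem.List.pyRange 1 (mn + 1) 1).filter
          (fun n => PySem.Int.mod n 2 == w && !bet.contains n)
      ↔ 1 ≤ x ∧ x ≤ mn ∧ x % 2 = w ∧ x ∉ bet := by
  simp only [List.mem_filter, PySem.List.mem_pyRange_one, Bool.and_eq_true, beq_iff_eq,
    Bool.not_eq_true', List.contains_eq_mem, decide_eq_false_iff_not,
    PySem.Int.mod_eq_emod_of_pos (by norm_num : (0:Int) < 2)]
  constructor
  · rintro ⟨⟨h1, h2⟩, h3, h4⟩; exact ⟨h1, by omega, h3, h4⟩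
  · rintro ⟨h1, h2, h3, h4⟩; exact ⟨⟨h1, by omega⟩, h3, h4⟩

-- core: A's min over candidates equals B's below/above selection, then both set the index
theorem pv_branch (bet : List Int) (mn t w : Int)
    (hw : w = 0 ∨ w = 1)
    (htpar : PySem.Int.mod t 2 = 1 - w) :
    (match PySem.List.min?
        ((PySem.List.pyRange 1 (mn + 1) 1).filter
          (fun n => PySem.Int.mod n 2 == w && !bet.contains n))
        (fun x => |x - t|) with
      | none => PySem.List.sorted bet (fun x => x) false
      | some replacement =>
        match PySem.List.index? bet t with
        | none => PySem.List.sorted bet (fun x => x) false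
        | some i => PySem.List.sorted (PySem.List.pySetD bet (i : Int) replacement) (fun x => x) false)
    = (match
        (match (PySem.List.pyRange (if PySem.Int.mod (min t mn) 2 == w then min t mn else min t mn - 1) 0 (-2)).find?
              (fun x => !bet.contains x),
              (PySem.List.pyRange (if PySem.Int.mod (max t 1) 2 == w then max t 1 else max t 1 + 1) (mn + 1) 2).find?
              (fun x => !bet.contains x) with
          | some lo, none => some lo
          | some lo, some hi => if t - lo ≤ hi - t then some lo else some hi
          | none, some hi => some hi
          | none, none => none) with
      | none => PySem.List.sorted bet (fun x => x) false
      | some r =>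
        match PySem.List.index? bet t with
        | none => PySem.List.sorted bet (fun x => x) false
        | some i => PySem.List.sorted (PySem.List.pySetD bet (i : Int) r) (fun x => x) false) := by
  have htm : t % 2 = 1 - w := by
    rw [← PySem.Int.mod_eq_emod_of_pos (by norm_num : (0:Int) < 2)]; exact htpar
  set cands := (PySem.List.pyRange 1 (mn + 1) 1).filter
      (fun n => PySem.Int.mod n 2 == w && !bet.contains n) with hcands
  -- characterise the two scan lists
  have hs1' : (if PySem.Int.mod (min t mn) 2 == w then min t mn else min t mn - 1)
      = (if (min t mn) % 2 = w then min t mn else min t mn - 1) := by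
    rw [PySem.Int.mod_eq_emod_of_pos (by norm_num : (0:Int) < 2)]
    by_cases h : (min t mn) % 2 = w <;> simp [h]
  have hs2' : (if PySem.Int.mod (max t 1) 2 == w then max t 1 else max t 1 + 1)
      = (if (max t 1) % 2 = w then max t 1 else max t 1 + 1) := by
    rw [PySem.Int.mod_eq_emod_of_pos (by norm_num : (0:Int) < 2)]
    by_cases h : (max t 1) % 2 = w <;> simp [h]
  rw [hs1', hs2']
  set d1 : Int := if (min t mn) % 2 = w then min t mn else min t mn - 1 with hd1
  set d2 : Int := if (max t 1) % 2 = w then max t 1 else max t 1 + 1 with hd2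
  have hmemD : ∀ x : Int, x ∈ PySem.List.pyRange d1 0 (-2)
      ↔ 1 ≤ x ∧ x ≤ mn ∧ x % 2 = w ∧ x ≤ t := by
    intro x
    rw [PySem.List.mem_pyRange_iff_of_neg (by norm_num : (-2:Int) < 0)]
    constructor
    · rintro ⟨h1, h2, h3⟩
      rw [hd1] at h2 h3
      rw [Int.neg_dvd] at h3
      rcases hw with rfl | rfl <;> split_ifs at h2 h3 <;> omega
    · rintro ⟨h1, h2, h3, h4⟩
      rw [hd1, Int.neg_dvd]
      rcases hw with rfl | rfl <;> split_ifs <;> omega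
  have hmemA : ∀ x : Int, x ∈ PySem.List.pyRange d2 (mn + 1) 2
      ↔ 1 ≤ x ∧ x ≤ mn ∧ x % 2 = w ∧ t < x := by
    intro x
    rw [PySem.List.mem_pyRange_iff_of_pos (by norm_num : (0:Int) < 2)]
    constructor
    · rintro ⟨h1, h2, h3⟩
      rw [hd2] at h1 h3
      rcases hw with rfl | rfl <;> split_ifs at h1 h3 <;> omega
    · rintro ⟨h1, h2, h3, h4⟩
      rw [hd2]
      rcases hw with rfl | rfl <;> split_ifs <;> omega
  have hpwC : cands.Pairwise (· < ·) :=
    List.Pairwise.filter _ (PySem.List.pairwise_lt_pyRange_one 1 (mn + 1))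
  -- below / above facts
  cases hbel : (PySem.List.pyRange d1 0 (-2)).find? (fun x => !bet.contains x) with
  | some a =>
    obtain ⟨hpa, hamem, hamax⟩ := pv_find?_desc (pv_pairwise_pyRange_neg_two d1 0) hbel
    rw [hmemD] at hamem
    have haC : a ∈ cands := (pv_mem_cands bet mn w a).mpr
      ⟨hamem.1, hamem.2.1, hamem.2.2.1, by simpa using hpa⟩
    have hamax' : ∀ y ∈ cands, y ≤ t → y ≤ a := by
      intro y hy hyt
      obtain ⟨h1, h2, h3, h4⟩ := (pv_mem_cands bet mn w y).mp hy
      exact hamax y ((hmemD y).mpr ⟨h1, h2, h3, hyt⟩) (by simpa using h4)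
    have hat : a ≤ t := hamem.2.2.2
    cases habv : (PySem.List.pyRange d2 (mn + 1) 2).find? (fun x => !bet.contains x) with
    | none =>
      have hnoup : ∀ y ∈ cands, ¬ t < y := by
        intro y hy hty
        obtain ⟨h1, h2, h3, h4⟩ := (pv_mem_cands bet mn w y).mp hy
        exact (List.find?_eq_none.mp habv y ((hmemA y).mpr ⟨h1, h2, h3, hty⟩)) (by simpa using h4)
      obtain ⟨c1, c2, hc⟩ := List.append_of_mem haC
      rw [hc] at hpwC
      have hmin : PySem.List.min? cands (fun x => |x - t|) = some a := by
        rw [hc]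
        refine pv_min?_eq_first _ ?_ ?_
        · intro y hy
          have hyC : y ∈ cands := by rw [hc]; simp [hy]
          have hya : y < a := (List.pairwise_append.mp hpwC).2.2 y hy a (by simp)
          have hyt := hnoup y hyC
          rw [abs_of_nonpos (by omega), abs_of_nonpos (by omega)]; omega
        · intro y hy
          have hyC : y ∈ cands := by rw [hc]; simp [hy]
          have hay : a < y := (List.pairwise_cons.mp (List.pairwise_append.mp hpwC).2.1).1 y hy
          have hyt : ¬ t < y := hnoup y hyC
          exact absurd (hamax' y hyC (by omega)) (by omega)
      rw [hmin]
    | some b =>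
      obtain ⟨hpb, hbmem, hbmin⟩ := pv_find?_asc (pv_pairwise_pyRange_pos_two d2 (mn + 1)) habv
      rw [hmemA] at hbmem
      have hbC : b ∈ cands := (pv_mem_cands bet mn w b).mpr
        ⟨hbmem.1, hbmem.2.1, hbmem.2.2.1, by simpa using hpb⟩
      have hbmin' : ∀ y ∈ cands, t < y → b ≤ y := by
        intro y hy hty
        obtain ⟨h1, h2, h3, h4⟩ := (pv_mem_cands bet mn w y).mp hy
        exact hbmin y ((hmemA y).mpr ⟨h1, h2, h3, hty⟩) (by simpa using h4)
      have htb : t < b := hbmem.2.2.2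
      by_cases hcmp : t - a ≤ b - t
      · obtain ⟨c1, c2, hc⟩ := List.append_of_mem haC
        rw [hc] at hpwC
        have hmin : PySem.List.min? cands (fun x => |x - t|) = some a := by
          rw [hc]
          refine pv_min?_eq_first _ ?_ ?_
          · intro y hy
            have hyC : y ∈ cands := by rw [hc]; simp [hy]
            have hya : y < a := (List.pairwise_append.mp hpwC).2.2 y hy a (by simp)
            rw [abs_of_nonpos (by omega), abs_of_nonpos (by omega)]; omega
          · intro y hy
            have hyC : y ∈ cands := by rw [hc]; simp [hy]
            have hay : a < y := (List.pairwise_cons.mp (List.pairwise_append.mp hpwC).2.1).1 y hy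
            have hty : t < y := by
              by_contra h
              exact absurd (hamax' y hyC (by omega)) (by omega)
            have hby := hbmin' y hyC hty
            rw [abs_of_nonpos (by omega), abs_of_nonneg (by omega)]; omega
        rw [hmin]
        simp [hcmp]
      · obtain ⟨c1, c2, hc⟩ := List.append_of_mem hbC
        rw [hc] at hpwC
        have hmin : PySem.List.min? cands (fun x => |x - t|) = some b := by
          rw [hc]
          refine pv_min?_eq_first _ ?_ ?_
          · intro y hy
            have hyC : y ∈ cands := by rw [hc]; simp [hy]
            have hyb : y < b := (List.pairwise_append.mp hpwC).2.2 y hy b (by simp)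
            by_cases hty : t < y
            · have := hbmin' y hyC hty
              omega
            · have hya := hamax' y hyC (by omega)
              rw [abs_of_nonneg (by omega), abs_of_nonpos (by omega)]; omega
          · intro y hy
            have hyC : y ∈ cands := by rw [hc]; simp [hy]
            have hby : b < y := (List.pairwise_cons.mp (List.pairwise_append.mp hpwC).2.1).1 y hy
            rw [abs_of_nonneg (by omega), abs_of_nonneg (by omega)]; omega
        rw [hmin]
        simp [hcmp]
  | none =>
    have hnodown : ∀ y ∈ cands, ¬ y ≤ t := by
      intro y hy hyt
      obtain ⟨h1, h2, h3, h4⟩ := (pv_mem_cands bet mn w y).mp hy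
      exact (List.find?_eq_none.mp hbel y ((hmemD y).mpr ⟨h1, h2, h3, hyt⟩)) (by simpa using h4)
    cases habv : (PySem.List.pyRange d2 (mn + 1) 2).find? (fun x => !bet.contains x) with
    | none =>
      have hnil : cands = [] := by
        rw [List.eq_nil_iff_forall_not_mem]
        intro y hy
        obtain ⟨h1, h2, h3, h4⟩ := (pv_mem_cands bet mn w y).mp hy
        by_cases hty : y ≤ t
        · exact hnodown y hy hty
        · exact (List.find?_eq_none.mp habv y ((hmemA y).mpr ⟨h1, h2, h3, by omega⟩)) (by simpa using h4)
      rw [hnil]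
      rfl
    | some b =>
      obtain ⟨hpb, hbmem, hbmin⟩ := pv_find?_asc (pv_pairwise_pyRange_pos_two d2 (mn + 1)) habv
      rw [hmemA] at hbmem
      have hbC : b ∈ cands := (pv_mem_cands bet mn w b).mpr
        ⟨hbmem.1, hbmem.2.1, hbmem.2.2.1, by simpa using hpb⟩
      have hbmin' : ∀ y ∈ cands, t < y → b ≤ y := by
        intro y hy hty
        obtain ⟨h1, h2, h3, h4⟩ := (pv_mem_cands bet mn w y).mp hy
        exact hbmin y ((hmemA y).mpr ⟨h1, h2, h3, hty⟩) (by simpa using h4)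
      have htb : t < b := hbmem.2.2.2
      obtain ⟨c1, c2, hc⟩ := List.append_of_mem hbC
      rw [hc] at hpwC
      have hmin : PySem.List.min? cands (fun x => |x - t|) = some b := by
        rw [hc]
        refine pv_min?_eq_first _ ?_ ?_
        · intro y hy
          have hyC : y ∈ cands := by rw [hc]; simp [hy]
          have hyb : y < b := (List.pairwise_append.mp hpwC).2.2 y hy b (by simp)
          by_cases hty : t < y
          · have := hbmin' y hyC hty; omega
          · exact absurd (by omega : y ≤ t) (hnodown y hyC)
        · intro y hy
          have hyC : y ∈ cands := by rw [hc]; simp [hy]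
          have hby : b < y := (List.pairwise_cons.mp (List.pairwise_append.mp hpwC).2.1).1 y hy
          rw [abs_of_nonneg (by omega), abs_of_nonneg (by omega)]; omega
      rw [hmin]

-- ===== VERDICT (by name: the statement is the Claim_ definition above) =====
theorem enforce_parity_spec : Claim_equal_enforce_parity := by
  intro bet ms mn _ hpre
  unfold Spec_enforce_parity enforce_parity enforce_parity_alt
  simp only [pv_count_foldl_aux bet 0, zero_add, ← List.countP_eq_length_filter]
  set c : Int := (bet.countP (fun n => PySem.Int.mod n 2 == 1) : Int) with hc
  by_cases hbal : c ≤ ms ∧ 6 - c ≤ ms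
  · rw [if_pos hbal, if_pos hbal]
  · rw [if_neg hbal, if_neg hbal]
    unfold Pre_enforce_parity at hpre
    by_cases hodd : ms < c
    · rw [if_pos hodd, if_pos hodd]
      have hex : ∃ n ∈ bet, PySem.Int.mod n 2 = 1 := by
        rcases hpre with ⟨h1, h2⟩ | ⟨_, h⟩ | ⟨h1, _⟩ <;> first | exact h | (exfalso; omega)
      obtain ⟨n, hn, hpar⟩ := hex
      have hpar' : n % 2 = 1 := by
        rw [← PySem.Int.mod_eq_emod_of_pos (by norm_num : (0:Int) < 2)]; exact hpar
      have hne : bet.filter (fun n => PySem.Int.mod n 2 == 1) ≠ [] :=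
        List.ne_nil_of_mem (List.mem_filter.mpr ⟨hn, by simp [hpar']⟩)
      set t := PySem.List.pyGetD (bet.filter (fun n => PySem.Int.mod n 2 == 1)) (-1) 0 with htdef
      have htmemf : t ∈ bet.filter (fun n => PySem.Int.mod n 2 == 1) :=
        pv_pyGetD_neg_one_mem hne 0
      have htbet : t ∈ bet := (List.mem_filter.mp htmemf).1
      have htpar : PySem.Int.mod t 2 = 1 - 0 := by
        have := (List.mem_filter.mp htmemf).2; simpa using this
      exact pv_branch bet mn t 0 (Or.inl rfl) htpar
    · rw [if_neg hodd, if_neg hodd]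
      have hex : ∃ n ∈ bet, PySem.Int.mod n 2 = 0 := by
        rcases hpre with ⟨h1, h2⟩ | ⟨h, _⟩ | ⟨_, h⟩ <;> first | exact h | (exfalso; omega)
      obtain ⟨n, hn, hpar⟩ := hex
      have hpar' : n % 2 = 0 := by
        rw [← PySem.Int.mod_eq_emod_of_pos (by norm_num : (0:Int) < 2)]; exact hpar
      have hne : bet.filter (fun n => PySem.Int.mod n 2 == 0) ≠ [] :=
        List.ne_nil_of_mem (List.mem_filter.mpr ⟨hn, by simp [hpar']⟩)
      set t := PySem.List.pyGetD (bet.filter (fun n => PySem.Int.mod n 2 == 0)) (-1) 0 with htdef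
      have htmemf : t ∈ bet.filter (fun n => PySem.Int.mod n 2 == 0) :=
        pv_pyGetD_neg_one_mem hne 0
      have htbet : t ∈ bet := (List.mem_filter.mp htmemf).1
      have htpar : PySem.Int.mod t 2 = 1 - 1 := by
        have := (List.mem_filter.mp htmemf).2; simpa using this
      exact pv_branch bet mn t 1 (Or.inr rfl) htpar
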